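-- pv_equiv track=rewrite | github.com/Metyme1/leetcode-solutions | easy/1.py | find_substrings_with_same_start_end
-- ===== SOURCE A (Python) =====
-- def find_substrings_with_same_start_end(string):
--     substrings = []
--     n = len(string)
--     start = 0
--
--     while start < n:
--         end = start
--         while end < n:
--             if string[start] == string[end]:
--                 substring = string[start:end+1]  # Append substring from index start to end (inclusive)
--                 substrings.append(substring)
--             end += 1
--         start += 1
--
--     return substrings
-- ===== SOURCE B (Python) =====
-- def find_substrings_with_same_start_end(string):
--     positions = {}
--     for index, ch in enumerate(string):
--         positions.setdefault(ch, []).append(index)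
--     result = []
--     for start, ch in enumerate(string):
--         for end in positions[ch]:
--             if end >= start:
--                 result.append(string[start:end + 1])
--     return result
-- ===== Notes on version B (the rewrite author's own statement) =====
-- stated objective: alternative
-- what changed: Replaces A's nested index scan (inner loop over all end positions with an equality test) by a one-pass char->ascending-index-list dictionary; the start-major outer loop then iterates only the recorded positions of string[start] at or after start.
import Mathlib
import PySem

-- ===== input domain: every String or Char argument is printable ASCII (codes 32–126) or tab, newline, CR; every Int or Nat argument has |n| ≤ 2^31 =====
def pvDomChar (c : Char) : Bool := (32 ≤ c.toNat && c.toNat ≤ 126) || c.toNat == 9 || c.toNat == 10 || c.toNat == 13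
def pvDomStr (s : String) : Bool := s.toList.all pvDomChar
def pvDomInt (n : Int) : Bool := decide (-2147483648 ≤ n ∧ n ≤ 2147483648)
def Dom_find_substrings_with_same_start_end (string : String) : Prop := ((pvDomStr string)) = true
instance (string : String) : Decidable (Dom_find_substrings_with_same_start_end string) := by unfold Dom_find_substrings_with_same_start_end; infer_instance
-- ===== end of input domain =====

-- B replaces A's nested full index scan by a one-pass char -> ascending-position-list dictionary;
-- same return value, order included (an 'alternative' decomposition, no speed claim).

-- ===== PORT A =====
-- A's inner 'while end < n' loop; string[start:end+1] on 0 ≤ start ≤ end+1 is take/drop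
-- (exactly PySem.List.slice_natCast); loop counters are the Python ints, always ≥ 0 here.
def pvA_inner (cs : List Char) (n start e : Nat) (acc : List String) : List String :=
  if _h : e < n then
    pvA_inner cs n start (e + 1)
      (if cs[start]? == cs[e]? then
        acc ++ [String.ofList (List.take (e + 1 - start) (List.drop start cs))]
      else acc)
  else acc
termination_by n - e

-- A's outer 'while start < n' loop
def pvA_outer (cs : List Char) (n start : Nat) (acc : List String) : List String :=
  if _h : start < n then
    pvA_outer cs n (start + 1) (pvA_inner cs n start start acc)
  else acc
termination_by n - start

def find_substrings_with_same_start_end (string : String) : List String :=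
  pvA_outer string.toList string.toList.length 0 []

-- ===== PORT B =====
-- first pass of B: positions[ch] = ascending list of indices where ch occurs
-- (enumerate(string) is cs.zipIdx; setdefault(ch, []).append(i) is insert of getD ++ [i])
def pvB_positions (cs : List Char) : PySem.Dict Char (List Nat) :=
  cs.zipIdx.foldl (fun d p => d.insert p.1 (d.getD p.1 [] ++ [p.2])) PySem.Dict.empty

def find_substrings_with_same_start_end_alt (string : String) : List String :=
  let cs := string.toList
  let pos := pvB_positions cs
  cs.zipIdx.foldl
    (fun acc p =>
      (pos.getD p.1 []).foldl
        (fun acc2 e =>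
          if p.2 ≤ e then
            acc2 ++ [String.ofList (List.take (e + 1 - p.2) (List.drop p.2 cs))]
          else acc2)
        acc)
    []

-- ===== PRECONDITION & SPEC =====
def Spec_find_substrings_with_same_start_end (string : String) (out : List String) : Prop := out = find_substrings_with_same_start_end_alt string
instance (string : String) (out : List String) : Decidable (Spec_find_substrings_with_same_start_end string out) := by unfold Spec_find_substrings_with_same_start_end; infer_instance

-- ===== CLAIM (what is proved, stated in full; the proofs are below) =====
def Claim_equal_find_substrings_with_same_start_end : Prop := ∀ (string : String), Dom_find_substrings_with_same_start_end string → Spec_find_substrings_with_same_start_end string (find_substrings_with_same_start_end string)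

-- ===== LEMMAS AND PROOFS =====

-- the substring string[s:e+1]
def pvSub (cs : List Char) (s e : Nat) : String :=
  String.ofList (List.take (e + 1 - s) (List.drop s cs))

-- zipIdx as a map over an index range
theorem pv_zipIdx_eq (cs : List Char) : ∀ (k : Nat),
    cs.zipIdx k = (List.range' k cs.length).map (fun i => (cs.getD (i - k) 'a', i)) := by
  induction cs with
  | nil => intro k; simp
  | cons a cs ih =>
    intro k
    rw [List.zipIdx_cons, ih (k + 1)]
    simp only [List.length_cons, List.range'_succ, List.map_cons, Nat.sub_self,
      List.getD_cons_zero]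
    congr 1
    apply List.map_congr_left
    intro i hi
    have h1 : k + 1 ≤ i := (List.mem_range'_1.mp hi).1
    have h2 : i - k = (i - (k + 1)) + 1 := by omega
    rw [h2, List.getD_cons_succ]

-- the position dictionary, characterised
theorem pv_positions_foldl (l : List (Char × Nat)) :
    ∀ (d : PySem.Dict Char (List Nat)) (c : Char),
    (l.foldl (fun d p => d.insert p.1 (d.getD p.1 [] ++ [p.2])) d).getD c []
      = d.getD c [] ++ (l.filter (fun p => p.1 == c)).map Prod.snd := by
  induction l with
  | nil => intro d c; simp
  | cons a l ih =>
    intro d c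
    rw [List.foldl_cons, ih]
    by_cases h : c = a.1
    · subst h
      rw [PySem.Dict.getD_insert]
      simp
    · rw [PySem.Dict.getD_insert]
      have hne : (a.1 == c) = false := by simp [Ne.symm h]
      simp [h, hne]

theorem pv_positions_spec (cs : List Char) (c : Char) :
    (pvB_positions cs).getD c []
      = (List.range' 0 cs.length).filter (fun i => cs.getD i 'a' == c) := by
  unfold pvB_positions
  rw [pv_positions_foldl, PySem.Dict.getD_empty, pv_zipIdx_eq cs 0, List.filter_map]
  simp [List.map_map, Function.comp_def]

-- a range filtered by a lower bound
theorem pv_range_filter_ge (n s : Nat) (hs : s ≤ n) :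
    (List.range' 0 n).filter (fun i => decide (s ≤ i)) = List.range' s (n - s) := by
  have hsplit : List.range' 0 n = List.range' 0 s ++ List.range' s (n - s) := by
    have h := List.range'_append (s := 0) (m := s) (n := n - s) (step := 1)
    simp only [Nat.zero_add, Nat.one_mul] at h
    rw [h, Nat.add_sub_cancel' hs]
  rw [hsplit, List.filter_append]
  have h1 : (List.range' 0 s).filter (fun i => decide (s ≤ i)) = [] := by
    rw [List.filter_eq_nil_iff]
    intro a ha
    have := (List.mem_range'_1.mp ha).2
    simp; omega
  have h2 : (List.range' s (n - s)).filter (fun i => decide (s ≤ i)) = List.range' s (n - s) := by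
    rw [List.filter_eq_self]
    intro a ha
    have := (List.mem_range'_1.mp ha).1
    simpa
  rw [h1, h2, List.nil_append]

-- A's inner loop computes the filtered block
theorem pv_A_inner_spec (cs : List Char) (n start : Nat) : ∀ (k e : Nat) (acc : List String),
    n = e + k →
    pvA_inner cs n start e acc
      = acc ++ ((List.range' e k).filter (fun i => cs[start]? == cs[i]?)).map (pvSub cs start) := by
  intro k
  induction k with
  | zero =>
    intro e acc h
    rw [pvA_inner]
    simp [show ¬ e < n by omega]
  | succ k ih =>
    intro e acc h
    rw [pvA_inner]
    have he : e < n := by omega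
    simp only [he, dite_true]
    rw [ih (e + 1) _ (by omega)]
    rw [List.range'_succ, List.filter_cons]
    cases hc : (cs[start]? == cs[e]?) with
    | true => simp [pvSub, List.append_assoc]
    | false => simp

-- A's outer loop flattens the blocks
theorem pv_A_outer_spec (cs : List Char) (n : Nat) :
    ∀ (k s : Nat) (acc : List String), n = s + k →
    pvA_outer cs n s acc
      = acc ++ (List.range' s k).flatMap
          (fun st => ((List.range' st (n - st)).filter (fun i => cs[st]? == cs[i]?)).map (pvSub cs st)) := by
  intro k
  induction k with
  | zero =>
    intro s acc h
    rw [pvA_outer]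
    simp [show ¬ s < n by omega]
  | succ k ih =>
    intro s acc h
    rw [pvA_outer]
    have hs : s < n := by omega
    simp only [hs, dite_true]
    rw [ih (s + 1) _ (by omega),
      pv_A_inner_spec cs n s (n - s) s acc (by omega)]
    rw [List.range'_succ, List.flatMap_cons, List.append_assoc]

-- ===== VERDICT (by name: the statement is the Claim_ definition above) =====
set_option maxRecDepth 8192 in
theorem find_substrings_with_same_start_end_spec : Claim_equal_find_substrings_with_same_start_end := by
  intro string _
  unfold Spec_find_substrings_with_same_start_end
  unfold find_substrings_with_same_start_end find_substrings_with_same_start_end_alt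
  set cs := string.toList with hcs
  set n := cs.length with hn
  dsimp only
  rw [pv_A_outer_spec cs n n 0 [] (by omega), List.nil_append]
  -- rewrite B's inner loop into filter/map form
  have hbody : (fun (acc : List String) (p : Char × Nat) =>
      ((pvB_positions cs).getD p.1 []).foldl
        (fun acc2 e =>
          if p.2 ≤ e then
            acc2 ++ [String.ofList (List.take (e + 1 - p.2) (List.drop p.2 cs))]
          else acc2) acc)
      = fun acc p => acc ++
          (((pvB_positions cs).getD p.1 []).filter (fun e => decide (p.2 ≤ e))).map
            (fun e => String.ofList (List.take (e + 1 - p.2) (List.drop p.2 cs))) := by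
    funext acc p
    have h := PySem.List.foldl_append_if (fun e => decide (p.2 ≤ e))
      (fun e => String.ofList (List.take (e + 1 - p.2) (List.drop p.2 cs)))
      ((pvB_positions cs).getD p.1 []) acc
    simp only [decide_eq_true_eq] at h
    exact h
  rw [hbody, PySem.List.foldl_append_eq_flatMap, List.nil_append,
    pv_zipIdx_eq cs 0, List.flatMap_map]
  unfold List.flatMap
  congr 1
  apply List.map_congr_left
  intro i hi
  have hilt : i < n := by
    have := (List.mem_range'_1.mp hi).2
    omega
  dsimp only
  rw [pv_positions_spec, List.filter_filter]
  have hpred : (List.range' 0 n).filter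
      (fun a => decide (i ≤ a) && (cs.getD a 'a' == cs.getD (i - 0) 'a'))
      = (List.range' i (n - i)).filter (fun a => cs[i]? == cs[a]?) := by
    have hcomm : (List.range' 0 n).filter
        (fun a => decide (i ≤ a) && (cs.getD a 'a' == cs.getD (i - 0) 'a'))
        = ((List.range' 0 n).filter (fun a => decide (i ≤ a))).filter
            (fun a => cs.getD a 'a' == cs.getD (i - 0) 'a') := by
      rw [List.filter_filter]
      apply List.filter_congr
      intro a _
      rw [Bool.and_comm]
    rw [hcomm, pv_range_filter_ge n i (Nat.le_of_lt hilt)]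
    apply List.filter_congr
    intro a ha
    have halt : a < n := by
      have h1 := (List.mem_range'_1.mp ha).2
      omega
    rw [Nat.sub_zero, List.getD_eq_getElem cs 'a' halt, List.getD_eq_getElem cs 'a' hilt,
      List.getElem?_eq_getElem halt, List.getElem?_eq_getElem hilt]
    show (cs[a] == cs[i]) = (cs[i] == cs[a])
    exact Bool.beq_comm
  rw [hpred]
  apply List.map_congr_left
  intro a _
  rfl
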